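-- pv_equiv track=rewrite | github.com/satyamtyagi/nim-sd-visualization | generate_nim_data.py | generate_nim_data
-- ===== SOURCE A (Python) =====
-- def generate_nim_data(max_value):
--     """
--     Generate unique 3-tuple combinations for Nim game analysis.
--
--     Args:
--         max_value (int): Maximum number of stones in any pile
--
--     Returns:
--         list: List of tuples containing the data points
--     """
--     data_points = []
--
--     # Generate all combinations of pile sizes
--     for x in range(0, max_value + 1):
--         for y in range(0, max_value + 1):
--             for z in range(0, max_value + 1):
--                 # Only add if XOR of all numbers is 0 (Nim losing position)
--                 if x ^ y ^ z == 0: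
--                     data_points.append((x, y, z))
--
--     return data_points
-- ===== SOURCE B (Python) =====
-- def generate_nim_data(max_value):
--     """
--     Generate unique 3-tuple combinations for Nim game analysis.
--
--     For each (x, y) the only z with x ^ y ^ z == 0 is z = x ^ y, so each
--     row for a fixed x is a filtered comprehension over y, and the result
--     is the concatenation of the rows.
--     """
--     values = range(max_value + 1)
--
--     def row(x):
--         return [(x, y, x ^ y) for y in values if x ^ y <= max_value]
--
--     result = []
--     for x in values:
--         result.extend(row(x))
--     return result
-- ===== Notes on version B (the rewrite author's own statement) =====
-- stated objective: faster
-- what changed: Replaced the cubic triple-nested scan with accumulator appends by a quadratic construction: each row for a fixed x is a filtered comprehension over y computing the unique z = x ^ y, and the rows are concatenated (flatMap of filter+map instead of nested folds).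
import Mathlib
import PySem

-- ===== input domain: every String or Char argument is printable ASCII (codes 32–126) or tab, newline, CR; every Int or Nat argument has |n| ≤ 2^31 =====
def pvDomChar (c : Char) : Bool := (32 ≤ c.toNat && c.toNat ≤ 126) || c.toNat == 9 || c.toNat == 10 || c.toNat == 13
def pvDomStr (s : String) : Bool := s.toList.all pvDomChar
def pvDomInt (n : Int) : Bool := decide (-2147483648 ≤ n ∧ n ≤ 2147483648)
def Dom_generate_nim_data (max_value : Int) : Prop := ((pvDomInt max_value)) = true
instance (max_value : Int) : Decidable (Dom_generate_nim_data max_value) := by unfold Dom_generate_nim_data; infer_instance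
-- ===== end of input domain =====

-- B replaces A's cubic accumulator scan over all (x,y,z) by a quadratic flatMap of per-x rows, each a filter+map over y computing the unique z = x ^ y (objective: faster).

-- ===== PORT A =====
-- triple nested loop over range(0, max_value+1), appending (x,y,z) when x ^ y ^ z == 0
def generate_nim_data (max_value : Int) : List (List Int) :=
  (PySem.List.pyRange 0 (max_value + 1) 1).foldl (fun acc x =>
    (PySem.List.pyRange 0 (max_value + 1) 1).foldl (fun acc y =>
      (PySem.List.pyRange 0 (max_value + 1) 1).foldl (fun acc z =>
        if PySem.Int.bxor (PySem.Int.bxor x y) z == 0 then acc ++ [[x, y, z]] else acc) acc) acc) []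

-- ===== PORT B =====
-- row x = [(x, y, x ^ y) for y in values if x ^ y <= max_value]; result = concatenation of rows
def nimRow (max_value x : Int) : List (List Int) :=
  ((PySem.List.pyRange 0 (max_value + 1) 1).filter
      (fun y => PySem.Int.bxor x y ≤ max_value)).map
    (fun y => [x, y, PySem.Int.bxor x y])

def generate_nim_data_alt (max_value : Int) : List (List Int) :=
  (PySem.List.pyRange 0 (max_value + 1) 1).flatMap (nimRow max_value)

-- ===== PRECONDITION & SPEC =====
def Spec_generate_nim_data (max_value : Int) (out : List (List Int)) : Prop := out = generate_nim_data_alt max_value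
instance (max_value : Int) (out : List (List Int)) : Decidable (Spec_generate_nim_data max_value out) := by unfold Spec_generate_nim_data; infer_instance

-- ===== CLAIM (what is proved, stated in full; the proofs are below) =====
def Claim_equal_generate_nim_data : Prop := ∀ (max_value : Int), Dom_generate_nim_data max_value → Spec_generate_nim_data max_value (generate_nim_data max_value)

-- ===== LEMMAS AND PROOFS =====

theorem filter_range_eq (n v : Nat) :
    (List.range n).filter (fun c => c == v) = if v < n then [v] else [] := by
  induction n with
  | zero => simp
  | succ n ih =>
    simp [List.range_succ, List.filter_append, ih]
    by_cases h : v < n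
    · simp [h, Nat.ne_of_gt h]; omega
    · by_cases h2 : v = n
      · simp [h2]
      · have : (n == v) = false := by simp [Ne.symm h2]
        have hvn : ¬ v ≤ n := by omega
        simp [List.filter, this, h, hvn]

-- A's innermost z-loop appends exactly the single triple with z = x ^ y, when that z is in range.
theorem inner_loop_eq (m x y : Int) (hx : x ∈ PySem.List.pyRange 0 (m + 1) 1)
    (hy : y ∈ PySem.List.pyRange 0 (m + 1) 1) (acc : List (List Int)) :
    (PySem.List.pyRange 0 (m + 1) 1).foldl (fun acc z =>
        if PySem.Int.bxor (PySem.Int.bxor x y) z == 0 then acc ++ [[x, y, z]] else acc) acc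
    = if PySem.Int.bxor x y ≤ m then acc ++ [[x, y, PySem.Int.bxor x y]] else acc := by
  rw [PySem.List.mem_pyRange_one] at hx hy
  obtain ⟨a, rfl⟩ : ∃ a : Nat, x = (a : Int) := ⟨x.toNat, by omega⟩
  obtain ⟨b, rfl⟩ : ∃ b : Nat, y = (b : Int) := ⟨y.toNat, by omega⟩
  rw [PySem.List.foldl_append_if
      (p := fun z => PySem.Int.bxor (PySem.Int.bxor (a : Int) (b : Int)) z == 0)
      (f := fun z => [(a : Int), (b : Int), z])]
  rw [PySem.List.pyRange_one, List.filter_map]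
  have hpred : ((fun z => PySem.Int.bxor (PySem.Int.bxor (a : Int) (b : Int)) z == 0) ∘
      (fun k : Nat => (0 : Int) + k)) = (fun c : Nat => c == a ^^^ b) := by
    funext c
    simp [Nat.xor_eq_zero_iff, eq_comm]
  rw [hpred, filter_range_eq]
  have hm : 0 ≤ m := by omega
  by_cases hle : ((a ^^^ b : Nat) : Int) ≤ m
  · simp [hle]
  · simp [hle]

-- A's middle y-loop equals appending row x.
theorem middle_loop_eq (m x : Int) (hx : x ∈ PySem.List.pyRange 0 (m + 1) 1)
    (acc : List (List Int)) :
    (PySem.List.pyRange 0 (m + 1) 1).foldl (fun acc y =>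
      (PySem.List.pyRange 0 (m + 1) 1).foldl (fun acc z =>
        if PySem.Int.bxor (PySem.Int.bxor x y) z == 0 then acc ++ [[x, y, z]] else acc) acc) acc
    = acc ++ nimRow m x := by
  have h1 :
      (PySem.List.pyRange 0 (m + 1) 1).foldl (fun acc y =>
        (PySem.List.pyRange 0 (m + 1) 1).foldl (fun acc z =>
          if PySem.Int.bxor (PySem.Int.bxor x y) z == 0 then acc ++ [[x, y, z]] else acc) acc) acc
      = (PySem.List.pyRange 0 (m + 1) 1).foldl (fun acc y =>
        if PySem.Int.bxor x y ≤ m then acc ++ [[x, y, PySem.Int.bxor x y]] else acc) acc :=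
    by apply PySem.List.foldl_congr_mem; intro acc y hy; exact inner_loop_eq m x y hx hy acc
  rw [h1]
  rw [PySem.List.foldl_append_ite
      (p := fun y => PySem.Int.bxor x y ≤ m)
      (f := fun y => [x, y, PySem.Int.bxor x y])]
  rfl

-- ===== VERDICT (by name: the statement is the Claim_ definition above) =====
theorem generate_nim_data_spec : Claim_equal_generate_nim_data := by
  intro m _
  unfold Spec_generate_nim_data generate_nim_data generate_nim_data_alt
  have h1 :
      (PySem.List.pyRange 0 (m + 1) 1).foldl (fun acc x =>
        (PySem.List.pyRange 0 (m + 1) 1).foldl (fun acc y =>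
          (PySem.List.pyRange 0 (m + 1) 1).foldl (fun acc z =>
            if PySem.Int.bxor (PySem.Int.bxor x y) z == 0 then acc ++ [[x, y, z]] else acc) acc) acc) []
      = (PySem.List.pyRange 0 (m + 1) 1).foldl (fun acc x => acc ++ nimRow m x) [] :=
    by apply PySem.List.foldl_congr_mem; intro acc x hx; exact middle_loop_eq m x hx acc
  rw [h1]
  rw [PySem.List.foldl_append_eq_flatMap]
  rfl
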